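-- pv_equiv track=rewrite | github.com/Anamicca23/Leetcode-for-DSA | 3539-find-sum-of-array-product-of-magical-sequences/3539-find-sum-of-array-product-of-magical-sequences.py | magicalSum
-- ===== SOURCE A (Python) =====
-- def magicalSum(m, k, nums):
--     """
--     :type m: int
--     :type k: int
--     :type nums: List[int]
--     :rtype: int
--     """
--     M = 10**9 + 7
--     l = len(nums)
--     d = {}
--
--     def f(r, n, i, c):
--         if r < 0 or n < 0 or r + bin(c).count('1') < n:
--             return 0
--         if r == 0:
--             return 1 if n == bin(c).count('1') else 0
--         if i >= l:
--             return 0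
--
--         key = (r, n, i, c)
--         if key in d:
--             return d[key]
--
--         res = 0
--         for t in range(r + 1):
--             w = 1
--             for j in range(t):
--                 w = w * (r - j) // (j + 1)
--             w %= M
--             v = pow(nums[i], t, M)
--             nc = c + t
--             res = (res + w * v % M * f(r - t, n - (nc % 2), i + 1, nc // 2)) % M
--
--         d[key] = res
--         return res
--
--     return f(m, k, 0, 0)
-- ===== SOURCE B (Python) =====
-- def magicalSum(m, k, nums):
--     # Bottom-up tabulation instead of A's top-down memoized recursion: sweep the
--     # elements once, carrying a dictionary of reachable states
--     # (picks used, pending carry, settled one-bits) -> summed weight mod M,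
--     # with binomials from one precomputed Pascal triangle and powers of the
--     # current element updated incrementally; finish by summing the states whose
--     # settled bits plus the carry's bits give exactly k.
--     MOD = 10 ** 9 + 7
--     if m < 0 or k < 0 or k > m:
--         # at most one settled bit per pick, so more than m ones is impossible
--         return 0
--     if not nums:
--         return 1 if m == 0 and k == 0 else 0
--     top = m
--     # Pascal triangle mod MOD: C[r][t] = binom(r, t) % MOD
--     C = [[1]]
--     prev = [1]
--     for r in range(1, top + 1):
--         row = [1]
--         for t in range(1, r):
--             row.append((prev[t - 1] + prev[t]) % MOD)
--         row.append(1)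
--         C.append(row)
--         prev = row
--     states = {(0, 0, 0): 1}
--     for x in nums:
--         nxt = {}
--         for (used, carry, ones), v in states.items():
--             rem = m - used
--             if ones > k or ones + rem + bin(carry).count('1') < k:
--                 continue
--             row = C[rem]
--             p = 1
--             for t in range(rem + 1):
--                 nc = carry + t
--                 key = (used + t, nc // 2, ones + nc % 2)
--                 nxt[key] = (nxt.get(key, 0) + v * row[t] % MOD * p) % MOD
--                 p = p * x % MOD
--         states = nxt
--     res = 0
--     for (used, carry, ones), v in states.items():
--         if used == m and ones + bin(carry).count('1') == k:
--             res = (res + v) % MOD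
--     return res
-- ===== Notes on version B (the rewrite author's own statement) =====
-- stated objective: alternative
-- what changed: A's top-down memoized recursion over (remaining, needed-ones, index, carry) with a per-term binomial product loop and modular pow is replaced by a bottom-up single sweep over the elements that tabulates reachable (used, carry, settled-ones) states in a dictionary, taking binomials from one precomputed Pascal triangle and updating element powers incrementally, then sums the states whose settled bits plus carry bits equal k.
import Mathlib
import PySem

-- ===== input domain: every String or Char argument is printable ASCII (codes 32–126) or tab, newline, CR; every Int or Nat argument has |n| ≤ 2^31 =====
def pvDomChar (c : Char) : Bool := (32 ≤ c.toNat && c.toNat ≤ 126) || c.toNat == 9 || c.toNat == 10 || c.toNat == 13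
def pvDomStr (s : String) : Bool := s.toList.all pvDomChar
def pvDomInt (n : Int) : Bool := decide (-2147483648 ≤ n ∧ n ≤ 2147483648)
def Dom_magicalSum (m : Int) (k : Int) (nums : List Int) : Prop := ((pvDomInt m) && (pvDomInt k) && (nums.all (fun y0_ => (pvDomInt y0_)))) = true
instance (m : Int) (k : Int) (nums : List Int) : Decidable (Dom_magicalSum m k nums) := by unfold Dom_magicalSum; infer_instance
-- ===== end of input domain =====

-- B replaces A's top-down memoized recursion by a bottom-up sweep over the elements
-- that tabulates reachable (used, carry, settled-ones) states in a dictionary,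
-- with binomials from one Pascal triangle and incrementally updated powers
-- (objective: alternative; equivalence of the return values is proved below).

-- ===== PORT A =====
-- f(r, n, i, c): the index i is represented by the suffix rest = nums[i:]
-- (f reads only nums[i] and i >= l, i.e. the head of the suffix / suffix empty);
-- the memo dict d caches a pure function and does not change its value, so it is dropped.
def pvFA (M : Int) (rest : List Int) (r : Int) (n : Int) (c : Int) : Int :=
  if r < 0 ∨ n < 0 ∨ r + (PySem.Int.bitCount c : Int) < n then 0
  else if r = 0 then (if n = (PySem.Int.bitCount c : Int) then 1 else 0)
  else
    match rest with
    | [] => 0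
    | x :: rest' =>
      (PySem.List.pyRange 0 (r + 1)).foldl (fun res t =>
        let w := PySem.Int.mod ((PySem.List.pyRange 0 t).foldl
            (fun w j => PySem.Int.floordiv (w * (r - j)) (j + 1)) 1) M
        let v := PySem.Int.powMod x t.toNat M
        let nc := c + t
        PySem.Int.mod (res + PySem.Int.mod (w * v) M *
          pvFA M rest' (r - t) (n - PySem.Int.mod nc 2) (PySem.Int.floordiv nc 2)) M) 0

def magicalSum (m : Int) (k : Int) (nums : List Int) : Int :=
  pvFA (10 ^ 9 + 7) nums m k 0

-- ===== PORT B =====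
-- one Pascal row from the previous one: [1] + middle + [1]
def pvRowB (M : Int) (prev : List Int) (r : Int) : List Int :=
  ((PySem.List.pyRange 1 r).foldl (fun row t =>
    row ++ [PySem.Int.mod (PySem.List.pyGetD prev (t - 1) 0 + PySem.List.pyGetD prev t 0) M]) [1]) ++ [1]

-- the loop building C (accumulator = (C, prev))
def pvPascal (M : Int) (top : Int) : List (List Int) :=
  ((PySem.List.pyRange 1 (top + 1)).foldl (fun Cp r =>
    let row := pvRowB M Cp.2 r
    (Cp.1 ++ [row], row)) ([[1]], [1])).1

-- the inner 'for t in range(rem + 1)' loop of B for one state (key, v);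
-- accumulator = (nxt, p), exactly Python's pair of mutables
def pvInner (M : Int) (m : Int) (k : Int) (C : List (List Int)) (x : Int)
    (nxt0 : PySem.Dict (Int × Int × Int) Int) (key : Int × Int × Int) (v : Int) :
    PySem.Dict (Int × Int × Int) Int :=
  let rem := m - key.1
  if key.2.2 > k ∨ key.2.2 + rem + (PySem.Int.bitCount key.2.1 : Int) < k then nxt0
  else
  let row := PySem.List.pyGetD C rem []
  ((PySem.List.pyRange 0 (rem + 1)).foldl
    (fun (acc : PySem.Dict (Int × Int × Int) Int × Int) t =>
      let nc := key.2.1 + t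
      let k' : Int × Int × Int := (key.1 + t, PySem.Int.floordiv nc 2, key.2.2 + PySem.Int.mod nc 2)
      (acc.1.insert k' (PySem.Int.mod (acc.1.getD k' 0 +
         PySem.Int.mod (v * PySem.List.pyGetD row t 0) M * acc.2) M),
       PySem.Int.mod (acc.2 * x) M)) (nxt0, 1)).1

-- bottom-up tabulation: dict of states (used, carry, ones) -> value mod M
def magicalSum_alt (m : Int) (k : Int) (nums : List Int) : Int :=
  let M : Int := 10 ^ 9 + 7
  if m < 0 ∨ k < 0 ∨ k > m then 0
  else if nums = [] then (if m = 0 ∧ k = 0 then 1 else 0)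
  else
    let C := pvPascal M m
    let states0 : PySem.Dict (Int × Int × Int) Int := PySem.Dict.ofList [((0, 0, 0), 1)]
    let states := nums.foldl (fun st x =>
      st.items.foldl (fun nxt p => pvInner M m k C x nxt p.1 p.2) PySem.Dict.empty) states0
    states.items.foldl (fun res p =>
      if p.1.1 = m ∧ p.1.2.2 + (PySem.Int.bitCount p.1.2.1 : Int) = k
      then PySem.Int.mod (res + p.2) M else res) 0

-- ===== PRECONDITION & SPEC =====
def Spec_magicalSum (m : Int) (k : Int) (nums : List Int) (out : Int) : Prop := out = magicalSum_alt m k nums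
instance (m : Int) (k : Int) (nums : List Int) (out : Int) : Decidable (Spec_magicalSum m k nums out) := by unfold Spec_magicalSum; infer_instance

-- ===== CLAIM (what is proved, stated in full; the proofs are below) =====
def Claim_equal_magicalSum : Prop := ∀ (m : Int) (k : Int) (nums : List Int), Dom_magicalSum m k nums → Spec_magicalSum m k nums (magicalSum m k nums)

-- ===== LEMMAS AND PROOFS =====

-- the common mathematical value of both programs, as an element of ZMod (10^9+7):
-- pvZ rest r n c = Σ over ways to pick t copies of each remaining element
-- (t's summing to r with the carry chain starting at c settling exactly n one-bits)
-- of binom * element-power weights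
def pvZ : List Int → Int → Int → Int → ZMod 1000000007
  | [], r, n, c => if r = 0 ∧ (PySem.Int.bitCount c : Int) = n then 1 else 0
  | x :: rest, r, n, c =>
    ((PySem.List.pyRange 0 (r + 1)).map (fun t =>
      (r.toNat.choose t.toNat : ZMod 1000000007) * (x : ZMod 1000000007) ^ t.toNat *
      pvZ rest (r - t) (n - PySem.Int.mod (c + t) 2) (PySem.Int.floordiv (c + t) 2))).sum

theorem pv_numM : (10 : Int) ^ 9 + 7 = 1000000007 := by norm_num

theorem pv_castmod (a : Int) : ((PySem.Int.mod a 1000000007 : Int) : ZMod 1000000007) = (a : ZMod 1000000007) := by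
  rw [PySem.Int.mod_eq_emod_of_pos (by norm_num)]
  have h : (1000000007 : Int) = ((1000000007 : Nat) : Int) := by norm_num
  rw [h, ZMod.intCast_mod]


theorem pv_floordiv2_nonneg (c : Int) (hc : 0 ≤ c) : 0 ≤ PySem.Int.floordiv c 2 := by
  rw [PySem.Int.floordiv_eq_ediv_of_pos (by norm_num)]
  exact Int.ediv_nonneg hc (by norm_num)

theorem pv_bc_split (c : Int) (hc : 0 ≤ c) :
    (PySem.Int.bitCount c : Int) = PySem.Int.mod c 2 + (PySem.Int.bitCount (PySem.Int.floordiv c 2) : Int) := by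
  rcases eq_or_lt_of_le hc with h | h
  · rw [← h]; decide
  · rw [PySem.Int.bitCount_of_pos h]
    push_cast
    rw [Int.toNat_of_nonneg (PySem.Int.mod_nonneg c (by norm_num))]

theorem pv_bcN_succ (n : Nat) :
    PySem.Int.bitCount ((n + 1 : Nat) : Int) ≤ PySem.Int.bitCount ((n : Nat) : Int) + 1 := by
  induction n using Nat.strong_induction_on with
  | _ n ih =>
    rcases Nat.even_or_odd n with he | ho
    · obtain ⟨q, hq⟩ := he
      rw [PySem.Int.bitCount_natCast (m := n + 1) (by omega)]
      have h1 : (n + 1) % 2 = 1 := by omega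
      have h2 : (n + 1) / 2 = q := by omega
      rw [h1, h2]
      rcases Nat.eq_zero_or_pos n with h0 | hp
      · have hq0 : q = 0 := by omega
        rw [hq0, h0]
        simp [PySem.Int.bitCount_zero]
      · rw [PySem.Int.bitCount_natCast (m := n) hp]
        have h3 : n % 2 = 0 := by omega
        have h4 : n / 2 = q := by omega
        rw [h3, h4]
        omega
    · obtain ⟨q, hq⟩ := ho
      rw [PySem.Int.bitCount_natCast (m := n + 1) (by omega)]
      have h1 : (n + 1) % 2 = 0 := by omega
      have h2 : (n + 1) / 2 = q + 1 := by omega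
      rw [h1, h2, PySem.Int.bitCount_natCast (m := n) (by omega)]
      have h3 : n % 2 = 1 := by omega
      have h4 : n / 2 = q := by omega
      rw [h3, h4]
      have := ih q (by omega)
      omega

theorem pv_bcN_add (n t : Nat) :
    PySem.Int.bitCount ((n + t : Nat) : Int) ≤ PySem.Int.bitCount ((n : Nat) : Int) + t := by
  induction t with
  | zero => simp
  | succ t ih =>
    have := pv_bcN_succ (n + t)
    have h : n + (t + 1) = (n + t) + 1 := by omega
    rw [h]
    omega

theorem pv_bc_add_le (c t : Int) (hc : 0 ≤ c) (ht : 0 ≤ t) :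
    (PySem.Int.bitCount (c + t) : Int) ≤ (PySem.Int.bitCount c : Int) + t := by
  lift c to Nat using hc with cN
  lift t to Nat using ht with tN
  rw [← Nat.cast_add]
  exact_mod_cast pv_bcN_add cN tN

-- pvZ is 0 when n < 0
theorem pvZ_neg_n : ∀ (rest : List Int) (r n c : Int), n < 0 → pvZ rest r n c = 0 := by
  intro rest
  induction rest with
  | nil =>
    intro r n c hn
    rw [pvZ]
    rw [if_neg]
    rintro ⟨-, h⟩
    have : (0:Int) ≤ (PySem.Int.bitCount c : Int) := Int.natCast_nonneg _
    omega
  | cons x rest ih =>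
    intro r n c hn
    rw [pvZ]
    apply List.sum_eq_zero
    intro y hy
    simp only [List.mem_map] at hy
    obtain ⟨t, ht, rfl⟩ := hy
    rw [ih _ _ _ (by have := PySem.Int.mod_nonneg (c + t) (b := 2) (by norm_num); omega)]
    ring

-- pvZ at r = 0 is the settled-bits indicator, whatever the remaining elements are
theorem pvZ_zero_r : ∀ (rest : List Int) (n c : Int), 0 ≤ c →
    pvZ rest 0 n c = if (PySem.Int.bitCount c : Int) = n then 1 else 0 := by
  intro rest
  induction rest with
  | nil => intro n c _; rw [pvZ]; simp
  | cons x rest ih =>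
    intro n c hc
    rw [pvZ]
    have hr : PySem.List.pyRange 0 (0 + 1) = [0] := by decide
    rw [hr]
    simp only [List.map_cons, List.map_nil, List.sum_cons, List.sum_nil]
    rw [show c + 0 = c from by ring, show (0:Int) - 0 = 0 from rfl]
    rw [ih _ _ (pv_floordiv2_nonneg _ (by omega))]
    have hsplit := pv_bc_split c hc
    simp only [Int.toNat_zero, Nat.choose_self, pow_zero, Nat.cast_one, one_mul, mul_one]
    by_cases h : (PySem.Int.bitCount c : Int) = n
    · rw [if_pos h, if_pos (by omega)]
      ring
    · rw [if_neg h, if_neg (by omega)]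
      ring

-- A's pruning guard is sound: too few picks left to settle n ones means the sum is 0
theorem pvZ_prune : ∀ (rest : List Int) (r n c : Int), 0 ≤ c → 0 ≤ r →
    r + (PySem.Int.bitCount c : Int) < n → pvZ rest r n c = 0 := by
  intro rest
  induction rest with
  | nil =>
    intro r n c hc hr hlt
    rw [pvZ, if_neg]
    rintro ⟨rfl, h⟩
    omega
  | cons x rest ih =>
    intro r n c hc hr hlt
    rw [pvZ]
    apply List.sum_eq_zero
    intro y hy
    simp only [List.mem_map] at hy
    obtain ⟨t, ht, rfl⟩ := hy
    rw [PySem.List.mem_pyRange_one] at ht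
    have hmod := PySem.Int.mod_nonneg (c + t) (b := 2) (by norm_num)
    have hmlt := PySem.Int.mod_lt (c + t) (b := 2) (by norm_num)
    have hsplit := pv_bc_split (c + t) (by omega)
    have hadd := pv_bc_add_le c t hc (by omega)
    rw [ih (r - t) (n - PySem.Int.mod (c + t) 2) (PySem.Int.floordiv (c + t) 2)
        (pv_floordiv2_nonneg _ (by omega)) (by omega) (by omega)]
    ring


-- A's inner product loop computes the exact binomial coefficient C(R, T)
theorem pv_wloop (R T : Nat) (hT : T ≤ R) :
    (PySem.List.pyRange 0 (T : Int)).foldl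
      (fun w j => PySem.Int.floordiv (w * ((R : Int) - j)) (j + 1)) 1 = (R.choose T : Int) := by
  induction T with
  | zero => simp [PySem.List.pyRange_one_eq_nil (le_refl (0:Int))]
  | succ T ih =>
    have h1 : (0:Int) ≤ (T:Int) := Int.natCast_nonneg T
    rw [show ((T+1 : Nat) : Int) = (T:Int) + 1 by push_cast; ring,
        PySem.List.pyRange_one_succ_right h1, List.foldl_append,
        ih (Nat.le_of_succ_le hT)]
    simp only [List.foldl]
    have hsub : (R:Int) - (T:Int) = ((R - T : Nat) : Int) := by
      have := Nat.le_of_succ_le hT; omega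
    rw [hsub, show ((T:Int) + 1) = ((T+1 : Nat) : Int) by push_cast; ring,
        ← Nat.cast_mul, PySem.Int.floordiv_natCast,
        ← Nat.choose_succ_right_eq, Nat.mul_div_cancel _ (Nat.succ_pos T)]

theorem pv_powcast (x : Int) (t : Nat) :
    ((PySem.Int.powMod x t 1000000007 : Int) : ZMod 1000000007) = (x : ZMod 1000000007) ^ t := by
  have h : PySem.Int.powMod x t 1000000007 = (x ^ t) % 1000000007 := by
    simp [PySem.Int.powMod]
  rw [h, show (1000000007 : Int) = ((1000000007 : Nat) : Int) by norm_num, ZMod.intCast_mod]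
  push_cast
  rfl

-- cast of A's modular accumulation loop: a plain sum in ZMod (10^9+7)
theorem pvA_foldcast (x : Int) (rest' : List Int) (r n c : Int) (hc : 0 ≤ c)
    (IH : ∀ r' n' c', 0 ≤ c' → ((pvFA (10 ^ 9 + 7) rest' r' n' c' : Int) : ZMod 1000000007) = pvZ rest' r' n' c') :
    ∀ (l : List Int) (res : Int), (∀ t ∈ l, 0 ≤ t ∧ t ≤ r) →
    ((l.foldl (fun res t =>
        let w := PySem.Int.mod ((PySem.List.pyRange 0 t).foldl
            (fun w j => PySem.Int.floordiv (w * (r - j)) (j + 1)) 1) (10 ^ 9 + 7)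
        let v := PySem.Int.powMod x t.toNat (10 ^ 9 + 7)
        let nc := c + t
        PySem.Int.mod (res + PySem.Int.mod (w * v) (10 ^ 9 + 7) *
          pvFA (10 ^ 9 + 7) rest' (r - t) (n - PySem.Int.mod nc 2) (PySem.Int.floordiv nc 2)) (10 ^ 9 + 7)) res : Int) : ZMod 1000000007)
      = (res : ZMod 1000000007) + (l.map (fun t =>
          (r.toNat.choose t.toNat : ZMod 1000000007) * (x : ZMod 1000000007) ^ t.toNat *
          pvZ rest' (r - t) (n - PySem.Int.mod (c + t) 2) (PySem.Int.floordiv (c + t) 2))).sum := by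
  intro l
  induction l with
  | nil => intro res _; simp
  | cons t l ihl =>
    intro res hmem
    obtain ⟨ht0, htr⟩ := hmem t List.mem_cons_self
    rw [List.foldl_cons, ihl _ (fun u hu => hmem u (List.mem_cons_of_mem _ hu))]
    simp only [List.map_cons, List.sum_cons]
    have hw : (PySem.List.pyRange 0 t).foldl
        (fun w j => PySem.Int.floordiv (w * (r - j)) (j + 1)) 1 = (r.toNat.choose t.toNat : Int) := by
      have h1 : t = ((t.toNat : Nat) : Int) := by omega
      have h2 : r = ((r.toNat : Nat) : Int) := by omega
      rw [h1]
      conv_lhs => rw [h2]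
      exact pv_wloop r.toNat t.toNat (by omega)
    simp only [pv_numM, hw, pv_castmod, Int.cast_add, Int.cast_mul]
    simp only [pv_numM] at IH
    rw [pv_powcast, IH _ _ _ (pv_floordiv2_nonneg _ (by omega))]
    push_cast
    ring

-- cast of A's program to ZMod: it computes pvZ
theorem pvA_cast : ∀ (rest : List Int) (r n c : Int), 0 ≤ c →
    ((pvFA (10 ^ 9 + 7) rest r n c : Int) : ZMod 1000000007) = pvZ rest r n c := by
  intro rest
  induction rest with
  | nil =>
    intro r n c hc
    rw [pvFA, pvZ]
    by_cases h1 : r < 0 ∨ n < 0 ∨ r + (PySem.Int.bitCount c : Int) < n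
    · rw [if_pos h1, if_neg]
      · simp
      · rintro ⟨rfl, h⟩
        have : (0:Int) ≤ (PySem.Int.bitCount c : Int) := Int.natCast_nonneg _
        omega
    · rw [if_neg h1]
      by_cases h2 : r = 0
      · subst h2
        rw [if_pos rfl]
        by_cases h3 : n = (PySem.Int.bitCount c : Int)
        · rw [if_pos h3, if_pos ⟨rfl, h3.symm⟩]; simp
        · rw [if_neg h3, if_neg (by rintro ⟨-, h⟩; exact h3 h.symm)]; simp
      · rw [if_neg h2, if_neg (by rintro ⟨h, -⟩; exact h2 h)]; simp
  | cons x rest ih =>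
    intro r n c hc
    rw [pvFA.eq_def]
    simp only []
    by_cases h1 : r < 0 ∨ n < 0 ∨ r + (PySem.Int.bitCount c : Int) < n
    · rw [if_pos h1]
      rcases h1 with h | h | h
      · rw [pvZ, PySem.List.pyRange_one_eq_nil (by omega : r + 1 ≤ 0)]
        simp
      · rw [pvZ_neg_n _ _ _ _ h]; simp
      · by_cases hr : 0 ≤ r
        · by_cases hn : 0 ≤ n
          · rw [pvZ_prune _ _ _ _ hc hr h]; simp
          · rw [pvZ_neg_n _ _ _ _ (by omega)]; simp
        · rw [pvZ, PySem.List.pyRange_one_eq_nil (by omega : r + 1 ≤ 0)]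
          simp
    · rw [if_neg h1]
      by_cases h2 : r = 0
      · subst h2
        rw [if_pos rfl, pvZ_zero_r _ _ _ hc]
        by_cases h3 : n = (PySem.Int.bitCount c : Int)
        · rw [if_pos h3, if_pos h3.symm]; simp
        · rw [if_neg h3, if_neg (fun h => h3 h.symm)]; simp
      · rw [if_neg h2, pvZ]
        rw [pvA_foldcast x rest r n c hc ih _ 0 (by
          intro t ht
          rw [PySem.List.mem_pyRange_one] at ht
          omega)]
        simp


-- a fold whose every step ends in % M stays inside [0, M)
theorem pv_fold_mod_range (M : Int) (hM : 0 < M) (g : Int → Int → Int) :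
    ∀ (l : List Int) (res : Int), 0 ≤ res → res < M →
    0 ≤ l.foldl (fun res t => PySem.Int.mod (g res t) M) res ∧
      l.foldl (fun res t => PySem.Int.mod (g res t) M) res < M := by
  intro l
  induction l with
  | nil => intro res h1 h2; exact ⟨h1, h2⟩
  | cons t l ih =>
    intro res h1 h2
    rw [List.foldl_cons]
    exact ih _ (PySem.Int.mod_nonneg _ hM) (PySem.Int.mod_lt _ hM)

theorem pvFA_range (rest : List Int) (r n c : Int) :
    0 ≤ pvFA (10 ^ 9 + 7) rest r n c ∧ pvFA (10 ^ 9 + 7) rest r n c < 10 ^ 9 + 7 := by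
  rw [pvFA.eq_def]
  by_cases h1 : r < 0 ∨ n < 0 ∨ r + (PySem.Int.bitCount c : Int) < n
  · rw [if_pos h1]; norm_num
  · rw [if_neg h1]
    by_cases h2 : r = 0
    · rw [if_pos h2]
      by_cases h3 : n = (PySem.Int.bitCount c : Int)
      · rw [if_pos h3]; norm_num
      · rw [if_neg h3]; norm_num
    · rw [if_neg h2]
      cases rest with
      | nil => norm_num
      | cons x rest' =>
        exact pv_fold_mod_range (10 ^ 9 + 7) (by norm_num)
          (fun res t => res + PySem.Int.mod
            (PySem.Int.mod ((PySem.List.pyRange 0 t).foldl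
              (fun w j => PySem.Int.floordiv (w * (r - j)) (j + 1)) 1) (10 ^ 9 + 7) *
             PySem.Int.powMod x t.toNat (10 ^ 9 + 7)) (10 ^ 9 + 7) *
            pvFA (10 ^ 9 + 7) rest' (r - t) (n - PySem.Int.mod (c + t) 2) (PySem.Int.floordiv (c + t) 2))
          _ 0 (by norm_num) (by norm_num)

theorem pv_mod_one (M : Int) (hM : 1 < M) : PySem.Int.mod 1 M = 1 := by
  rw [PySem.Int.mod_eq_emod_of_pos (by omega)]
  exact Int.emod_eq_of_lt (by omega) hM

theorem pv_modmul (a b : Int) :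
    PySem.Int.mod (PySem.Int.mod a (10 ^ 9 + 7) * b) (10 ^ 9 + 7) = PySem.Int.mod (a * b) (10 ^ 9 + 7) := by
  rw [PySem.Int.mod_eq_emod_of_pos (by norm_num), PySem.Int.mod_eq_emod_of_pos (by norm_num),
      PySem.Int.mod_eq_emod_of_pos (by norm_num)]
  rw [Int.mul_emod, Int.emod_emod_of_dvd _ dvd_rfl, ← Int.mul_emod]

-- the intended value of row R of the Pascal triangle
def pvRowC (M : Int) (R : Nat) : List Int :=
  (List.range (R+1)).map (fun t => PySem.Int.mod (R.choose t : Int) M)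

theorem pv_rowB (M : Int) (hM : 1 < M) (R : Nat) :
    pvRowB M (pvRowC M R) ((R : Int) + 1) = pvRowC M (R+1) := by
  rw [pvRowB, PySem.List.foldl_append_singleton_eq_map]
  have hrange : PySem.List.pyRange 1 ((R:Int) + 1)
      = (List.range R).map (fun (k : Nat) => ((k+1 : Nat) : Int)) := by
    rw [PySem.List.pyRange_one]
    have h : ((R:Int) + 1 - 1).toNat = R := by omega
    rw [h]
    apply List.map_congr_left
    intro a _
    push_cast
    ring
  rw [hrange, List.map_map]
  have hmid : (List.range R).map ((fun t => PySem.Int.mod (PySem.List.pyGetD (pvRowC M R) (t - 1) 0 +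
        PySem.List.pyGetD (pvRowC M R) t 0) M) ∘ (fun (k : Nat) => ((k+1 : Nat) : Int)))
      = (List.range R).map (fun i => PySem.Int.mod (((R+1).choose (i+1) : Nat) : Int) M) := by
    apply List.map_congr_left
    intro i hi
    have hiR : i < R := List.mem_range.mp hi
    simp only [Function.comp]
    have h1 : (((i+1 : Nat)) : Int) - 1 = ((i : Nat) : Int) := by push_cast; ring
    rw [h1, PySem.List.pyGetD_natCast, PySem.List.pyGetD_natCast, pvRowC,
        PySem.List.getD_map_range _ _ _ _ (by omega),
        PySem.List.getD_map_range _ _ _ _ (by omega)]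
    rw [PySem.Int.mod_eq_emod_of_pos (by omega), PySem.Int.mod_eq_emod_of_pos (by omega),
        PySem.Int.mod_eq_emod_of_pos (by omega), PySem.Int.mod_eq_emod_of_pos (by omega)]
    rw [Int.add_emod (_ % M), Int.emod_emod_of_dvd _ dvd_rfl, Int.emod_emod_of_dvd _ dvd_rfl,
        ← Int.add_emod]
    push_cast [Nat.choose_succ_succ R i]
    rfl
  rw [hmid, pvRowC, List.range_succ (n := R+1), List.map_append, List.range_succ_eq_map,
      List.map_cons, List.map_map]
  simp [pv_mod_one M hM]

theorem pv_pascal_aux (M : Int) (hM : 1 < M) (T : Nat) :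
    (PySem.List.pyRange 1 ((T : Int) + 1)).foldl (fun Cp r =>
      let row := pvRowB M Cp.2 r
      (Cp.1 ++ [row], row)) ([[1]], [1])
    = ((List.range (T+1)).map (pvRowC M), pvRowC M T) := by
  induction T with
  | zero =>
    rw [PySem.List.pyRange_one_eq_nil (by norm_num)]
    simp [pvRowC, pv_mod_one M hM]
  | succ T ih =>
    rw [show ((T+1 : Nat) : Int) + 1 = ((T:Int) + 1) + 1 by push_cast; ring,
        PySem.List.pyRange_one_succ_right (by omega), List.foldl_append, ih]
    simp only [List.foldl]
    rw [pv_rowB M hM T]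
    simp [List.range_succ]

theorem pv_pascal (M : Int) (hM : 1 < M) (T : Nat) :
    pvPascal M (T : Int) = (List.range (T+1)).map (pvRowC M) := by
  rw [pvPascal, pv_pascal_aux M hM T]


-- weighted sums over the state dictionary
def pvGS (g : Int × Int × Int → ZMod 1000000007) (l : List ((Int × Int × Int) × Int)) : ZMod 1000000007 :=
  (l.map (fun p => (p.2 : ZMod 1000000007) * g p.1)).sum

def pvWS (rest : List Int) (m k : Int) (d : PySem.Dict (Int × Int × Int) Int) : ZMod 1000000007 :=
  pvGS (fun s => pvZ rest (m - s.1) (k - s.2.2) s.2.1) d.items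

-- dictionary invariant: unique keys and non-negative 'used' components
def pvP (d : PySem.Dict (Int × Int × Int) Int) : Prop :=
  d.keys.Nodup ∧ ∀ p ∈ d.items, 0 ≤ p.1.1 ∧ 0 ≤ p.1.2.1

theorem pv_replace_sum (g : Int × Int × Int → ZMod 1000000007) :
    ∀ (l : List ((Int × Int × Int) × Int)) (kk : Int × Int × Int) (v0 w : Int),
    (l.map Prod.fst).Nodup → (kk, v0) ∈ l →
    pvGS g (l.map (fun p => if p.1 == kk then (kk, w) else p))
      = pvGS g l - (v0 : ZMod 1000000007) * g kk + (w : ZMod 1000000007) * g kk := by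
  intro l
  induction l with
  | nil => intro kk v0 w _ hmem; cases hmem
  | cons a l ih =>
    intro kk v0 w hnd hmem
    rw [List.map_cons, List.nodup_cons] at hnd
    rcases List.mem_cons.mp hmem with heq | hmem'
    · obtain rfl : a = (kk, v0) := heq.symm
      simp only [List.map_cons, beq_self_eq_true, if_pos]
      have htail : l.map (fun p => if p.1 == kk then (kk, w) else p) = l := by
        conv_rhs => rw [← List.map_id l]
        apply List.map_congr_left
        intro p hp
        have : p.1 ≠ kk := by
          intro h
          exact hnd.1 (List.mem_map.mpr ⟨p, hp, h⟩)
        simp [this]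
      rw [htail]
      simp only [pvGS, List.map_cons, List.sum_cons]
      ring
    · have hne : (a.1 == kk) = false := by
        apply beq_eq_false_iff_ne.mpr
        intro h
        exact hnd.1 (List.mem_map.mpr ⟨(kk, v0), hmem', h.symm⟩)
      simp only [pvGS, List.map_cons, List.sum_cons, hne, if_neg, Bool.false_eq_true,
        not_false_eq_true]
      have := ih kk v0 w hnd.2 hmem'
      simp only [pvGS] at this
      rw [this]
      ring

theorem pv_insert_sum (g : Int × Int × Int → ZMod 1000000007)
    (d : PySem.Dict (Int × Int × Int) Int) (hnd : d.keys.Nodup) (kk : Int × Int × Int) (δ : Int) :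
    pvGS g ((d.insert kk (PySem.Int.mod (d.getD kk 0 + δ) (10 ^ 9 + 7))).items)
      = pvGS g d.items + (δ : ZMod 1000000007) * g kk := by
  by_cases hcon : d.contains kk
  · have hsome : (d.get? kk).isSome := by
      rw [← PySem.Dict.contains_eq_isSome_get?]
      exact hcon
    obtain ⟨v0, hv0⟩ := Option.isSome_iff_exists.mp hsome
    have hmem := PySem.Dict.mem_items_of_get?_eq_some d hv0
    have hgetD : d.getD kk 0 = v0 := PySem.Dict.getD_of_get?_eq_some d 0 hv0
    rw [PySem.Dict.items_insert_of_contains d _ hcon, hgetD]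
    have hndl : (d.items.map Prod.fst).Nodup := hnd
    rw [pv_replace_sum g d.items kk v0 _ hndl hmem]
    have hcast : ((PySem.Int.mod (v0 + δ) (10 ^ 9 + 7) : Int) : ZMod 1000000007)
        = (v0 : ZMod 1000000007) + (δ : ZMod 1000000007) := by
      rw [pv_numM, pv_castmod]
      push_cast
      rfl
    rw [hcast]
    ring
  · rw [PySem.Dict.items_insert_of_not_contains d _ (by simpa using hcon),
        PySem.Dict.getD_of_not_contains d _ (by simpa using hcon)]
    simp only [pvGS, List.map_append, List.sum_append, List.map_cons, List.map_nil,
      List.sum_cons, List.sum_nil]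
    have hcast : ((PySem.Int.mod (0 + δ) (10 ^ 9 + 7) : Int) : ZMod 1000000007)
        = (δ : ZMod 1000000007) := by
      rw [pv_numM, pv_castmod]
      push_cast
      ring
    rw [hcast]
    ring


-- the body of B's innermost loop, as a named function (defeq to the lambda in pvInner)
def pvStep (x v : Int) (key : Int × Int × Int) (row : List Int)
    (acc : PySem.Dict (Int × Int × Int) Int × Int) (t : Int) :
    PySem.Dict (Int × Int × Int) Int × Int :=
  (acc.1.insert (key.1 + t, PySem.Int.floordiv (key.2.1 + t) 2, key.2.2 + PySem.Int.mod (key.2.1 + t) 2)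
     (PySem.Int.mod (acc.1.getD (key.1 + t, PySem.Int.floordiv (key.2.1 + t) 2,
        key.2.2 + PySem.Int.mod (key.2.1 + t) 2) 0 +
        PySem.Int.mod (v * PySem.List.pyGetD row t 0) (10 ^ 9 + 7) * acc.2) (10 ^ 9 + 7)),
   PySem.Int.mod (acc.2 * x) (10 ^ 9 + 7))

theorem pv_inner_aux (m k x v : Int) (key : Int × Int × Int) (rest : List Int) (row : List Int)
    (hu : 0 ≤ key.1) (hca : 0 ≤ key.2.1)
    (hrow : row = pvRowC (10 ^ 9 + 7) (m - key.1).toNat)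
    (nxt0 : PySem.Dict (Int × Int × Int) Int) (hP : pvP nxt0) :
    ∀ (T : Nat), (T : Int) ≤ (m - key.1) + 1 →
    pvP (((PySem.List.pyRange 0 (T : Int)).foldl (pvStep x v key row) (nxt0, 1)).1) ∧
    ((PySem.List.pyRange 0 (T : Int)).foldl (pvStep x v key row) (nxt0, 1)).2
        = PySem.Int.mod (x ^ T) (10 ^ 9 + 7) ∧
    pvWS rest m k (((PySem.List.pyRange 0 (T : Int)).foldl (pvStep x v key row) (nxt0, 1)).1)
      = pvWS rest m k nxt0 + (v : ZMod 1000000007) *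
        ((PySem.List.pyRange 0 (T : Int)).map (fun t =>
          ((m - key.1).toNat.choose t.toNat : ZMod 1000000007) * (x : ZMod 1000000007) ^ t.toNat *
          pvZ rest ((m - key.1) - t) ((k - key.2.2) - PySem.Int.mod (key.2.1 + t) 2)
            (PySem.Int.floordiv (key.2.1 + t) 2))).sum := by
  intro T
  induction T with
  | zero =>
    intro _
    rw [show ((0:Nat):Int) = 0 from rfl, PySem.List.pyRange_one_eq_nil (le_refl 0)]
    simp only [List.foldl_nil, List.map_nil, List.sum_nil]
    refine ⟨hP, ?_, by ring⟩
    rw [pow_zero, pv_mod_one _ (by norm_num)]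
  | succ T ih =>
    intro hT
    have hTle : (T:Int) ≤ m - key.1 := by push_cast at hT; omega
    obtain ⟨ihP, ihp, ihWS⟩ := ih (by push_cast at hT ⊢; omega)
    rw [show ((T+1 : Nat):Int) = (T:Int) + 1 by push_cast; ring,
        PySem.List.pyRange_one_succ_right (Int.natCast_nonneg T), List.foldl_append,
        List.map_append]
    simp only [List.foldl_cons, List.foldl_nil, List.map_cons, List.map_nil,
      List.sum_append, List.sum_cons, List.sum_nil]
    set acc := (PySem.List.pyRange 0 (T : Int)).foldl (pvStep x v key row) (nxt0, 1) with hacc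
    have hentry : PySem.List.pyGetD row ((T:Nat):Int) 0
        = PySem.Int.mod (((m - key.1).toNat.choose T : Nat) : Int) (10 ^ 9 + 7) := by
      rw [hrow, pvRowC, PySem.List.pyGetD_natCast]
      exact PySem.List.getD_map_range _ _ _ _ (by omega)
    refine ⟨⟨PySem.Dict.nodup_keys_insert _ _ _ ihP.1, ?_⟩, ?_, ?_⟩
    · intro p hp
      rcases (PySem.Dict.mem_items_insert _ _ _ _).mp hp with heq | ⟨hmem, -⟩
      · rw [heq]
        have h0T : (0:Int) ≤ (T:Int) := Int.natCast_nonneg T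
        constructor
        · show (0:Int) ≤ key.1 + ((T:Nat):Int)
          omega
        · show (0:Int) ≤ PySem.Int.floordiv (key.2.1 + ((T:Nat):Int)) 2
          exact pv_floordiv2_nonneg _ (by omega)
      · exact ihP.2 p hmem
    · simp only [pvStep]
      rw [ihp, pv_modmul, ← pow_succ]
    · simp only [pvStep]
      rw [pvWS, pv_insert_sum _ _ ihP.1, ← pvWS]
      rw [ihWS, ihp, hentry]
      have e1 : m - (key.1 + ((T:Nat):Int)) = (m - key.1) - ((T:Nat):Int) := by ring
      have e2 : k - (key.2.2 + PySem.Int.mod (key.2.1 + ((T:Nat):Int)) 2)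
          = (k - key.2.2) - PySem.Int.mod (key.2.1 + ((T:Nat):Int)) 2 := by ring
      simp only [e1, e2, pv_numM, pv_castmod, Int.cast_mul, Int.toNat_natCast]
      try push_cast
      try ring

theorem pv_inner_lemma (m k x v : Int) (key : Int × Int × Int) (rest : List Int)
    (hm : 0 ≤ m) (hu : 0 ≤ key.1) (hca : 0 ≤ key.2.1)
    (nxt0 : PySem.Dict (Int × Int × Int) Int) (hP : pvP nxt0) :
    pvP (pvInner (10 ^ 9 + 7) m k (pvPascal (10 ^ 9 + 7) m) x nxt0 key v) ∧
    pvWS rest m k (pvInner (10 ^ 9 + 7) m k (pvPascal (10 ^ 9 + 7) m) x nxt0 key v)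
      = pvWS rest m k nxt0 + (v : ZMod 1000000007) *
          pvZ (x :: rest) (m - key.1) (k - key.2.2) key.2.1 := by
  by_cases hskip : key.2.2 > k ∨ key.2.2 + (m - key.1) + (PySem.Int.bitCount key.2.1 : Int) < k
  · have hpv : pvInner (10 ^ 9 + 7) m k (pvPascal (10 ^ 9 + 7) m) x nxt0 key v = nxt0 := by
      simp only [pvInner]
      rw [if_pos hskip]
    rw [hpv]
    refine ⟨hP, ?_⟩
    have hz : pvZ (x :: rest) (m - key.1) (k - key.2.2) key.2.1 = 0 := by
      by_cases hrem : 0 ≤ m - key.1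
      · rcases hskip with h | h
        · exact pvZ_neg_n _ _ _ _ (by omega)
        · by_cases hko : k - key.2.2 < 0
          · exact pvZ_neg_n _ _ _ _ hko
          · exact pvZ_prune _ _ _ _ hca hrem (by omega)
      · rw [pvZ, PySem.List.pyRange_one_eq_nil (by omega : (m - key.1) + 1 ≤ 0)]
        simp
    rw [hz]
    ring
  have hfold : pvInner (10 ^ 9 + 7) m k (pvPascal (10 ^ 9 + 7) m) x nxt0 key v
      = (((PySem.List.pyRange 0 ((m - key.1) + 1)).foldl
          (pvStep x v key (PySem.List.pyGetD (pvPascal (10 ^ 9 + 7) m) (m - key.1) []))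
          (nxt0, 1)).1) := by
    simp only [pvInner]
    rw [if_neg hskip]
    rfl
  by_cases hrem : 0 ≤ m - key.1
  · have hrow : PySem.List.pyGetD (pvPascal (10 ^ 9 + 7) m) (m - key.1) []
        = pvRowC (10 ^ 9 + 7) (m - key.1).toNat := by
      have h1 : pvPascal (10 ^ 9 + 7) m = (List.range (m.toNat + 1)).map (pvRowC (10 ^ 9 + 7)) := by
        conv_lhs => rw [show m = ((m.toNat : Nat) : Int) by omega]
        exact pv_pascal _ (by norm_num) _
      rw [h1, show m - key.1 = (((m - key.1).toNat : Nat) : Int) by omega, PySem.List.pyGetD_natCast]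
      exact PySem.List.getD_map_range _ _ _ _ (by omega)
    have haux := pv_inner_aux m k x v key rest _ hu hca hrow nxt0 hP ((m - key.1).toNat + 1)
      (by push_cast; omega)
    rw [show (((m - key.1).toNat + 1 : Nat) : Int) = (m - key.1) + 1 by push_cast; omega] at haux
    rw [hfold]
    refine ⟨haux.1, ?_⟩
    rw [haux.2.2]
    conv_rhs => rw [pvZ]
  · rw [hfold, PySem.List.pyRange_one_eq_nil (by omega : (m - key.1) + 1 ≤ 0)]
    simp only [List.foldl_nil]
    refine ⟨hP, ?_⟩
    rw [pvZ, PySem.List.pyRange_one_eq_nil (by omega : (m - key.1) + 1 ≤ 0)]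
    simp


theorem pv_items_fold (m k x : Int) (rest : List Int) (hm : 0 ≤ m) :
    ∀ (l : List ((Int × Int × Int) × Int)) (nxt0 : PySem.Dict (Int × Int × Int) Int),
    (∀ p ∈ l, 0 ≤ p.1.1 ∧ 0 ≤ p.1.2.1) → pvP nxt0 →
    pvP (l.foldl (fun nxt p => pvInner (10 ^ 9 + 7) m k (pvPascal (10 ^ 9 + 7) m) x nxt p.1 p.2) nxt0) ∧
    pvWS rest m k (l.foldl (fun nxt p => pvInner (10 ^ 9 + 7) m k (pvPascal (10 ^ 9 + 7) m) x nxt p.1 p.2) nxt0)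
      = pvWS rest m k nxt0 + pvGS (fun s => pvZ (x :: rest) (m - s.1) (k - s.2.2) s.2.1) l := by
  intro l
  induction l with
  | nil =>
    intro nxt0 _ hP
    simp only [List.foldl_nil, pvGS, List.map_nil, List.sum_nil]
    exact ⟨hP, by ring⟩
  | cons a l ih =>
    intro nxt0 hl hP
    have h1 := pv_inner_lemma m k x a.2 a.1 rest hm (hl a List.mem_cons_self).1 (hl a List.mem_cons_self).2 nxt0 hP
    rw [List.foldl_cons]
    obtain ⟨h2, h3⟩ := ih _ (fun p hp => hl p (List.mem_cons_of_mem _ hp)) h1.1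
    refine ⟨h2, ?_⟩
    rw [h3, h1.2]
    simp only [pvGS, List.map_cons, List.sum_cons]
    ring

theorem pv_states_fold (m k : Int) (hm : 0 ≤ m) :
    ∀ (nums : List Int) (d : PySem.Dict (Int × Int × Int) Int), pvP d →
    pvP (nums.foldl (fun st x => st.items.foldl
        (fun nxt p => pvInner (10 ^ 9 + 7) m k (pvPascal (10 ^ 9 + 7) m) x nxt p.1 p.2)
        PySem.Dict.empty) d) ∧
    pvWS [] m k (nums.foldl (fun st x => st.items.foldl
        (fun nxt p => pvInner (10 ^ 9 + 7) m k (pvPascal (10 ^ 9 + 7) m) x nxt p.1 p.2)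
        PySem.Dict.empty) d) = pvWS nums m k d := by
  intro nums
  induction nums with
  | nil => intro d hP; exact ⟨hP, rfl⟩
  | cons x nums ih =>
    intro d hP
    rw [List.foldl_cons]
    have hPe : pvP (PySem.Dict.empty : PySem.Dict (Int × Int × Int) Int) := by
      refine ⟨?_, ?_⟩
      · exact List.nodup_nil
      · intro p hp
        cases hp
    have h1 := pv_items_fold m k x nums hm d.items PySem.Dict.empty hP.2 hPe
    obtain ⟨h2, h3⟩ := ih _ h1.1
    refine ⟨h2, ?_⟩
    rw [h3, h1.2]
    have hze : pvWS nums m k (PySem.Dict.empty : PySem.Dict (Int × Int × Int) Int) = 0 := rfl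
    rw [hze, zero_add]
    rfl

theorem pv_final_fold (m k : Int) :
    ∀ (l : List ((Int × Int × Int) × Int)) (res : Int), 0 ≤ res → res < 10 ^ 9 + 7 →
    0 ≤ l.foldl (fun res p => if p.1.1 = m ∧ p.1.2.2 + (PySem.Int.bitCount p.1.2.1 : Int) = k
        then PySem.Int.mod (res + p.2) (10 ^ 9 + 7) else res) res ∧
    l.foldl (fun res p => if p.1.1 = m ∧ p.1.2.2 + (PySem.Int.bitCount p.1.2.1 : Int) = k
        then PySem.Int.mod (res + p.2) (10 ^ 9 + 7) else res) res < 10 ^ 9 + 7 ∧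
    ((l.foldl (fun res p => if p.1.1 = m ∧ p.1.2.2 + (PySem.Int.bitCount p.1.2.1 : Int) = k
        then PySem.Int.mod (res + p.2) (10 ^ 9 + 7) else res) res : Int) : ZMod 1000000007)
      = (res : ZMod 1000000007) + pvGS (fun s => pvZ [] (m - s.1) (k - s.2.2) s.2.1) l := by
  intro l
  induction l with
  | nil =>
    intro res h1 h2
    simp only [List.foldl_nil, pvGS, List.map_nil, List.sum_nil]
    exact ⟨h1, h2, by ring⟩
  | cons a l ih =>
    intro res h1 h2
    rw [List.foldl_cons]
    by_cases hc : a.1.1 = m ∧ a.1.2.2 + (PySem.Int.bitCount a.1.2.1 : Int) = k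
    · rw [if_pos hc]
      obtain ⟨g1, g2, g3⟩ := ih (PySem.Int.mod (res + a.2) (10 ^ 9 + 7))
        (PySem.Int.mod_nonneg _ (by norm_num)) (PySem.Int.mod_lt _ (by norm_num))
      refine ⟨g1, g2, ?_⟩
      rw [g3]
      have hone : pvZ [] (m - a.1.1) (k - a.1.2.2) a.1.2.1 = 1 := by
        rw [pvZ, if_pos ⟨by omega, by omega⟩]
      simp only [pvGS, List.map_cons, List.sum_cons, hone, pv_numM, pv_castmod]
      push_cast
      ring
    · rw [if_neg hc]
      obtain ⟨g1, g2, g3⟩ := ih res h1 h2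
      refine ⟨g1, g2, ?_⟩
      rw [g3]
      have hzero : pvZ [] (m - a.1.1) (k - a.1.2.2) a.1.2.1 = 0 := by
        rw [pvZ, if_neg]
        rintro ⟨ha, hb⟩
        exact hc ⟨by omega, by omega⟩
      simp only [pvGS, List.map_cons, List.sum_cons, hzero]
      ring

theorem pv_int_eq (a b : Int) (ha1 : 0 ≤ a) (ha2 : a < 10 ^ 9 + 7) (hb1 : 0 ≤ b) (hb2 : b < 10 ^ 9 + 7)
    (h : (a : ZMod 1000000007) = (b : ZMod 1000000007)) : a = b := by
  rw [pv_numM] at ha2 hb2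
  have h2 : a % ((1000000007 : Nat) : Int) = b % ((1000000007 : Nat) : Int) :=
    (ZMod.intCast_eq_intCast_iff a b 1000000007).mp h
  rw [Int.emod_eq_of_lt ha1 (by exact_mod_cast ha2), Int.emod_eq_of_lt hb1 (by exact_mod_cast hb2)] at h2
  exact h2

-- ===== VERDICT (by name: the statement is the Claim_ definition above) =====
theorem magicalSum_spec : Claim_equal_magicalSum := by
  intro m k nums _
  unfold Spec_magicalSum
  simp only [magicalSum, magicalSum_alt]
  by_cases hg : m < 0 ∨ k < 0 ∨ k > m
  · rw [if_pos hg, pvFA.eq_def]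
    have hguard : m < 0 ∨ k < 0 ∨ m + (PySem.Int.bitCount (0:Int) : Int) < k := by
      rcases hg with h | h | h
      · exact Or.inl h
      · exact Or.inr (Or.inl h)
      · refine Or.inr (Or.inr ?_)
        have hb : PySem.Int.bitCount (0:Int) = 0 := PySem.Int.bitCount_zero
        rw [hb]
        omega
    rw [if_pos hguard]
  · rw [if_neg hg]
    by_cases hnil : nums = []
    · subst hnil
      rw [if_pos rfl, pvFA]
      have hb : PySem.Int.bitCount (0:Int) = 0 := PySem.Int.bitCount_zero
      by_cases hm0 : m = 0
      · have hk0 : k = 0 := by omega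
        subst hm0; subst hk0
        decide
      · rw [if_neg (by rw [hb]; push_cast; omega), if_neg hm0, if_neg (by
          rintro ⟨h, -⟩; exact hm0 h)]
    rw [if_neg hnil]
    have hm : 0 ≤ m := by omega
    have hP0 : pvP (PySem.Dict.ofList [(((0:Int), (0:Int), (0:Int)), (1:Int))]) := by
      refine ⟨?_, ?_⟩
      · decide
      · intro p hp
        have hitems : (PySem.Dict.ofList [(((0:Int), (0:Int), (0:Int)), (1:Int))]).items
            = [(((0:Int), (0:Int), (0:Int)), (1:Int))] := rfl
        rw [hitems] at hp
        rcases List.mem_singleton.mp hp with rfl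
        exact ⟨by norm_num, by norm_num⟩
    obtain ⟨hPs, hWS⟩ := pv_states_fold m k hm nums _ hP0
    obtain ⟨hB1, hB2, hBcast⟩ := pv_final_fold m k _ 0 (le_refl 0) (by norm_num)
    apply pv_int_eq _ _ (pvFA_range nums m k 0).1 (pvFA_range nums m k 0).2 hB1 hB2
    rw [pvA_cast nums m k 0 (le_refl 0), hBcast]
    have hid : pvGS (fun s => pvZ [] (m - s.1) (k - s.2.2) s.2.1)
        (List.foldl (fun st x => st.items.foldl
          (fun nxt p => pvInner (10 ^ 9 + 7) m k (pvPascal (10 ^ 9 + 7) m) x nxt p.1 p.2)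
          PySem.Dict.empty) (PySem.Dict.ofList [(((0:Int), (0:Int), (0:Int)), (1:Int))]) nums).items
        = pvWS [] m k (List.foldl (fun st x => st.items.foldl
          (fun nxt p => pvInner (10 ^ 9 + 7) m k (pvPascal (10 ^ 9 + 7) m) x nxt p.1 p.2)
          PySem.Dict.empty) (PySem.Dict.ofList [(((0:Int), (0:Int), (0:Int)), (1:Int))]) nums) := rfl
    rw [hid, hWS]
    have hinit : pvWS nums m k (PySem.Dict.ofList [(((0:Int), (0:Int), (0:Int)), (1:Int))])
        = pvZ nums m k 0 := by
      have hitems : (PySem.Dict.ofList [(((0:Int), (0:Int), (0:Int)), (1:Int))]).items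
          = [(((0:Int), (0:Int), (0:Int)), (1:Int))] := rfl
      rw [pvWS, hitems]
      simp [pvGS]
    rw [hinit]
    simp
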